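-- pv_equiv track=rewrite | github.com/Rita-Ann-Roessner/Postdoc-UNIL | 260326_TCR_motif_atlas_exp_structures/tcr3d_fetch_and_analyze.py | find_tcr_chains_by_seq
-- ===== SOURCE A (Python) =====
-- def longest_common_substring(s1, s2):
--     m = [[0]*(1+len(s2)) for _ in range(1+len(s1))]
--     longest = 0
--
--     for i in range(1, len(s1)+1):
--         for j in range(1, len(s2)+1):
--             if s1[i-1] == s2[j-1]:
--                 m[i][j] = m[i-1][j-1] + 1
--                 longest = max(longest, m[i][j])
--
--     return longest
--
-- def find_tcr_chains_by_seq(chain_seqs, seg_seq, min_len=10):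
--     """ Find TCR chain by identifying overlap with gene segement. """
--     hits = []
--
--     seg_seq = seg_seq.lower()
--
--     for chain_id, seq in chain_seqs.items():
--         seq = seq.lower()
--
--         lcs = longest_common_substring(seq, seg_seq)
--
--         if lcs >= min_len:
--             hits.append(chain_id)
--
--     return hits
-- ===== SOURCE B (Python) =====
-- def find_tcr_chains_by_seq(chain_seqs, seg_seq, min_len=10):
--     """ Find TCR chain by identifying overlap with gene segement. """
--     seg = seg_seq.lower()
--     if min_len <= 0:
--         return list(chain_seqs.keys())
--     k = min_len
--     grams = {seg[p:p + k] for p in range(len(seg) - k + 1)}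
--     hits = []
--     for chain_id, seq in chain_seqs.items():
--         s = seq.lower()
--         if any(s[p:p + k] in grams for p in range(len(s) - k + 1)):
--             hits.append(chain_id)
--     return hits
-- ===== Notes on version B (the rewrite author's own statement) =====
-- stated objective: faster
-- what changed: Replaced the per-chain O(|seq|*|seg|) dynamic-programming longest-common-substring computation with a precomputed hash set of the segment's min_len-grams and a linear scan testing each chain's min_len-grams for membership (LCS >= k iff the two strings share a k-gram).
import Mathlib
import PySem

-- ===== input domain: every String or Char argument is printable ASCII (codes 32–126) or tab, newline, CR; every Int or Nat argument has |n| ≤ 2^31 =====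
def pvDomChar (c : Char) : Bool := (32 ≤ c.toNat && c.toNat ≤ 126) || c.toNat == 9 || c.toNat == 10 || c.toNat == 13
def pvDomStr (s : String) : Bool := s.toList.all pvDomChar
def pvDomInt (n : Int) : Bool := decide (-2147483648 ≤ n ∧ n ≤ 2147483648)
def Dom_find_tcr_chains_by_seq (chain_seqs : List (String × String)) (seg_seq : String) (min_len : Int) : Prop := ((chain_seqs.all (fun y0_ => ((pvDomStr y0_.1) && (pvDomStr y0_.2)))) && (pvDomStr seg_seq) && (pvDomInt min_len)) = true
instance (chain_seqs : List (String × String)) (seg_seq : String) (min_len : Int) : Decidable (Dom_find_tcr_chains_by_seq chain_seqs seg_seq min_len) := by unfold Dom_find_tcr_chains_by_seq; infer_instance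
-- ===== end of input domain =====

-- B replaces the per-chain O(|seq|·|seg|) DP longest-common-substring computation by a
-- precomputed set of the segment's min_len-grams, testing each chain's min_len-grams for
-- membership (objective: faster; LCS ≥ k iff the two strings share a substring of length k).

-- ===== PORT A =====
-- m[r][c] with the 0-as-default reads Python's list indexing performs here (all in range)
def pvCell (m : List (List Nat)) (r c : Nat) : Nat := (m.getD r []).getD c 0

-- Literal transliteration of longest_common_substring: the DP matrix m is built cell by cell.
-- Loop variables i, j here are 0-based (Python's `for i in range(1, len+1)` variable is i+1
-- here), so Python's reads s1[i-1], m[i-1][j-1] are l1[i], m[i][j] and the writes/reads of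
-- m[i][j] are at (i+1, j+1).
def longest_common_substring (s1 s2 : String) : Nat :=
  let l1 := s1.toList
  let l2 := s2.toList
  let m0 : List (List Nat) := List.replicate (l1.length + 1) (List.replicate (l2.length + 1) 0)
  let st := (List.range l1.length).foldl (fun st i =>
    (List.range l2.length).foldl (fun st j =>
      if l1.getD i ' ' = l2.getD j ' ' then
        let m' := st.1.set (i+1) ((st.1.getD (i+1) []).set (j+1) (pvCell st.1 i j + 1))
        (m', max st.2 (pvCell m' (i+1) (j+1)))
      else st) st) (m0, 0)
  st.2

def find_tcr_chains_by_seq (chain_seqs : List (String × String)) (seg_seq : String) (min_len : Int) : List String :=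
  let seg := PySem.Str.lower seg_seq
  chain_seqs.foldl (fun hits p =>
    let lcs := longest_common_substring (PySem.Str.lower p.2) seg
    if (lcs : Int) ≥ min_len then hits ++ [p.1] else hits) []

-- ===== PORT B =====
-- the k-grams of l, in order: s[p:p+k] ported as (drop p).take k (= PySem.List.slice_natCast_add)
def pvGrams (l : List Char) (k : Nat) : List (List Char) :=
  (List.range (l.length + 1 - k)).map (fun p => (l.drop p).take k)

def find_tcr_chains_by_seq_alt (chain_seqs : List (String × String)) (seg_seq : String) (min_len : Int) : List String :=
  let seg := (PySem.Str.lower seg_seq).toList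
  if min_len ≤ 0 then chain_seqs.map Prod.fst
  else
    let k := min_len.toNat
    let gs : PySem.Set (List Char) := PySem.Set.ofList (pvGrams seg k)
    chain_seqs.foldl (fun hits p =>
      if (pvGrams ((PySem.Str.lower p.2).toList) k).any (fun g => PySem.Set.contains gs g)
      then hits ++ [p.1] else hits) []

-- ===== PRECONDITION & SPEC =====
def Spec_find_tcr_chains_by_seq (chain_seqs : List (String × String)) (seg_seq : String) (min_len : Int) (out : List String) : Prop := out = find_tcr_chains_by_seq_alt chain_seqs seg_seq min_len
instance (chain_seqs : List (String × String)) (seg_seq : String) (min_len : Int) (out : List String) : Decidable (Spec_find_tcr_chains_by_seq chain_seqs seg_seq min_len out) := by unfold Spec_find_tcr_chains_by_seq; infer_instance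

-- ===== CLAIM (what is proved, stated in full; the proofs are below) =====
def Claim_equal_find_tcr_chains_by_seq : Prop := ∀ (chain_seqs : List (String × String)) (seg_seq : String) (min_len : Int), Dom_find_tcr_chains_by_seq chain_seqs seg_seq min_len → Spec_find_tcr_chains_by_seq chain_seqs seg_seq min_len (find_tcr_chains_by_seq chain_seqs seg_seq min_len)

-- ===== LEMMAS AND PROOFS =====

-- the DP value: length of the longest common suffix of a.take i and b.take j
def pvCsl (a b : List Char) : Nat → Nat → Nat
  | 0, _ => 0
  | _+1, 0 => 0
  | i+1, j+1 => if a.getD i ' ' = b.getD j ' ' then pvCsl a b i j + 1 else 0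

theorem pvCsl_zero_left (a b : List Char) (j : Nat) : pvCsl a b 0 j = 0 := rfl

theorem pvCsl_zero_right (a b : List Char) (i : Nat) : pvCsl a b i 0 = 0 := by
  cases i <;> rfl

theorem pvCsl_succ (a b : List Char) (i j : Nat) :
    pvCsl a b (i+1) (j+1) = if a.getD i ' ' = b.getD j ' ' then pvCsl a b i j + 1 else 0 := rfl

-- the cells satisfying R hold their final DP value, the others still hold 0, and the
-- running maximum st.2 is the maximum of pvCsl over R
def pvInv (a b : List Char) (R : Nat → Nat → Prop) (st : List (List Nat) × Nat) : Prop :=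
  st.1.length = a.length + 1 ∧
  (∀ r, r < st.1.length → (st.1.getD r []).length = b.length + 1) ∧
  (∀ r c, r ≤ a.length → c ≤ b.length →
     (R r c → pvCell st.1 r c = pvCsl a b r c) ∧ (¬ R r c → pvCell st.1 r c = 0)) ∧
  (∀ t, t ≤ st.2 ↔ t = 0 ∨ ∃ r c, r ≤ a.length ∧ c ≤ b.length ∧ R r c ∧ t ≤ pvCsl a b r c)

-- region processed after j inner steps of the outer step writing row i+1
def pvReg (i j r c : Nat) : Prop := r ≤ i ∨ (r = i + 1 ∧ 1 ≤ c ∧ c ≤ j)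

theorem pvInv_ext (a b : List Char) (R R' : Nat → Nat → Prop) (st : List (List Nat) × Nat)
    (hsub : ∀ r c, r ≤ a.length → c ≤ b.length → R r c → R' r c)
    (hnew : ∀ r c, r ≤ a.length → c ≤ b.length → R' r c → ¬ R r c → pvCsl a b r c = 0)
    (hI : pvInv a b R st) : pvInv a b R' st := by
  obtain ⟨h1, h2, h3, h4⟩ := hI
  refine ⟨h1, h2, ?_, ?_⟩
  · intro r c hr hc
    constructor
    · intro hR'
      by_cases hR : R r c
      · exact (h3 r c hr hc).1 hR
      · rw [(h3 r c hr hc).2 hR, hnew r c hr hc hR' hR]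
    · intro hnR'
      exact (h3 r c hr hc).2 (fun hR => hnR' (hsub r c hr hc hR))
  · intro t
    rw [h4 t]
    constructor
    · rintro (rfl | ⟨r, c, hr, hc, hR, ht⟩)
      · exact Or.inl rfl
      · exact Or.inr ⟨r, c, hr, hc, hsub r c hr hc hR, ht⟩
    · rintro (rfl | ⟨r, c, hr, hc, hR', ht⟩)
      · exact Or.inl rfl
      · by_cases hR : R r c
        · exact Or.inr ⟨r, c, hr, hc, hR, ht⟩
        · left; rw [hnew r c hr hc hR' hR] at ht; omega

theorem pvInv_init (a b : List Char) :
    pvInv a b (fun r _ => r ≤ 0)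
      (List.replicate (a.length + 1) (List.replicate (b.length + 1) 0), 0) := by
  have hcell : ∀ r c, pvCell (List.replicate (a.length + 1) (List.replicate (b.length + 1) 0)) r c = 0 := by
    have hrow : ∀ r, (List.replicate (a.length + 1) (List.replicate (b.length + 1) 0)).getD r []
        = if r < a.length + 1 then List.replicate (b.length + 1) 0 else [] := by
      intro r
      rw [List.getD_eq_getElem?_getD, List.getElem?_replicate]
      split <;> rfl
    intro r c
    unfold pvCell
    rw [hrow]
    split
    · rw [List.getD_eq_getElem?_getD, List.getElem?_replicate]
      split <;> rfl
    · rfl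
  refine ⟨by simp, ?_, ?_, ?_⟩
  · intro r hr
    simp only [List.length_replicate] at hr
    rw [List.getD_eq_getElem?_getD, List.getElem?_replicate, if_pos hr, Option.getD_some,
        List.length_replicate]
  · intro r c _ _
    constructor
    · intro hR
      have hr0 : r = 0 := by omega
      subst hr0
      rw [hcell, pvCsl_zero_left]
    · intro _; exact hcell r c
  · intro t
    constructor
    · intro ht
      left
      omega
    · rintro (rfl | ⟨r, c, _, _, hR, ht⟩)
      · exact Nat.zero_le _
      · have hr0 : r = 0 := by omega
        subst hr0
        rw [pvCsl_zero_left] at ht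
        omega

theorem pvInv_step (a b : List Char) (i j : Nat) (hi : i < a.length) (hj : j < b.length)
    (st : List (List Nat) × Nat) (hI : pvInv a b (pvReg i j) st) :
    pvInv a b (pvReg i (j+1))
      (if a.getD i ' ' = b.getD j ' ' then
        let m' := st.1.set (i+1) ((st.1.getD (i+1) []).set (j+1) (pvCell st.1 i j + 1))
        (m', max st.2 (pvCell m' (i+1) (j+1)))
      else st) := by
  obtain ⟨h1, h2, h3, h4⟩ := hI
  by_cases hch : a.getD i ' ' = b.getD j ' '
  · rw [if_pos hch]
    dsimp only
    have hlen1 : i + 1 < st.1.length := by omega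
    have hrlen : (st.1.getD (i+1) []).length = b.length + 1 := h2 _ hlen1
    have hj1 : j + 1 < (st.1.getD (i+1) []).length := by omega
    set v := pvCell st.1 i j + 1 with hv
    set X := (st.1.getD (i+1) []).set (j+1) v with hX
    set m' := st.1.set (i+1) X with hm'
    have hvv : v = pvCsl a b (i+1) (j+1) := by
      rw [pvCsl_succ, if_pos hch, hv]
      congr 1
      exact (h3 i j (by omega) (by omega)).1 (Or.inl (le_refl i))
    have hcell_other : ∀ r c, r ≠ i + 1 → pvCell m' r c = pvCell st.1 r c := by
      intro r c hne
      simp [pvCell, hm', List.getD_eq_getElem?_getD, List.getElem?_set_ne (Ne.symm hne)]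
    have hcell_row : ∀ c, pvCell m' (i+1) c = X.getD c 0 := by
      intro c
      simp [pvCell, hm', List.getD_eq_getElem?_getD, List.getElem?_set_self hlen1]
    have hcell_new : pvCell m' (i+1) (j+1) = v := by
      rw [hcell_row, hX, List.getD_eq_getElem?_getD, List.getElem?_set_self hj1]
      rfl
    have hcell_rowold : ∀ c, c ≠ j + 1 → pvCell m' (i+1) c = pvCell st.1 (i+1) c := by
      intro c hne
      rw [hcell_row, hX, List.getD_eq_getElem?_getD, List.getElem?_set_ne (Ne.symm hne)]
      simp [pvCell, List.getD_eq_getElem?_getD]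
    refine ⟨?_, ?_, ?_, ?_⟩
    · simp [hm', h1]
    · intro r hr
      simp only [hm', List.length_set] at hr
      by_cases hre : r = i + 1
      · subst hre
        have hXeq : m'.getD (i+1) [] = X := by
          rw [hm', List.getD_eq_getElem?_getD, List.getElem?_set_self hlen1, Option.getD_some]
        rw [hXeq, hX, List.length_set]
        exact hrlen
      · rw [hm']
        rw [List.getD_eq_getElem?_getD, List.getElem?_set_ne (Ne.symm hre),
            ← List.getD_eq_getElem?_getD]
        exact h2 r hr
    · intro r c hr hc
      constructor
      · intro hR'
        by_cases hre : r = i + 1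
        · subst hre
          by_cases hce : c = j + 1
          · subst hce
            rw [hcell_new, hvv]
          · rcases hR' with h | ⟨_, h1c, h2c⟩
            · omega
            · rw [hcell_rowold c hce]
              exact (h3 (i+1) c hr hc).1 (Or.inr ⟨rfl, h1c, by omega⟩)
        · rw [hcell_other r c hre]
          rcases hR' with h | ⟨h', _⟩
          · exact (h3 r c hr hc).1 (Or.inl h)
          · exact absurd h' hre
      · intro hnR'
        have hold : ¬ pvReg i j r c := by
          intro hR
          apply hnR'
          rcases hR with h | ⟨hre, h1c, h2c⟩
          · exact Or.inl h
          · exact Or.inr ⟨hre, h1c, by omega⟩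
        by_cases hre : r = i + 1
        · subst hre
          have hce : c ≠ j + 1 := by
            intro hce
            subst hce
            exact hnR' (Or.inr ⟨rfl, by omega, le_refl _⟩)
          rw [hcell_rowold c hce]
          exact (h3 (i+1) c hr hc).2 hold
        · rw [hcell_other r c hre]
          exact (h3 r c hr hc).2 hold
    · intro t
      rw [hcell_new, hvv]
      constructor
      · intro ht
        rcases le_max_iff.mp ht with h | h
        · rcases (h4 t).1 h with rfl | ⟨r, c, hr, hc, hR, htc⟩
          · exact Or.inl rfl
          · refine Or.inr ⟨r, c, hr, hc, ?_, htc⟩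
            rcases hR with h' | ⟨hre, h1c, h2c⟩
            · exact Or.inl h'
            · exact Or.inr ⟨hre, h1c, by omega⟩
        · exact Or.inr ⟨i+1, j+1, by omega, by omega, Or.inr ⟨rfl, by omega, le_refl _⟩, h⟩
      · rintro (rfl | ⟨r, c, hr, hc, hR', ht⟩)
        · exact Nat.zero_le _
        · rcases hR' with h | ⟨hre, h1c, h2c⟩
          · exact le_max_iff.mpr (Or.inl ((h4 t).2 (Or.inr ⟨r, c, hr, hc, Or.inl h, ht⟩)))
          · subst hre
            by_cases hce : c = j + 1
            · subst hce
              exact le_max_iff.mpr (Or.inr ht)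
            · exact le_max_iff.mpr (Or.inl ((h4 t).2
                (Or.inr ⟨i+1, c, hr, hc, Or.inr ⟨rfl, h1c, by omega⟩, ht⟩)))
  · rw [if_neg hch]
    have hz : pvCsl a b (i+1) (j+1) = 0 := by rw [pvCsl_succ, if_neg hch]
    refine pvInv_ext a b _ _ st ?_ ?_ ⟨h1, h2, h3, h4⟩
    · intro r c _ _ hR
      rcases hR with h | ⟨hre, h1c, h2c⟩
      · exact Or.inl h
      · exact Or.inr ⟨hre, h1c, by omega⟩
    · intro r c _ _ hR' hR
      rcases hR' with h | ⟨hre, h1c, h2c⟩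
      · exact absurd (Or.inl h) hR
      · subst hre
        have hce : c = j + 1 := by
          by_contra hne
          exact hR (Or.inr ⟨rfl, h1c, by omega⟩)
        subst hce
        exact hz

theorem pvInv_inner (a b : List Char) (i : Nat) (hi : i < a.length)
    (st : List (List Nat) × Nat) (hI : pvInv a b (fun r _ => r ≤ i) st) :
    pvInv a b (fun r _ => r ≤ i + 1)
      ((List.range b.length).foldl (fun st j =>
        if a.getD i ' ' = b.getD j ' ' then
          let m' := st.1.set (i+1) ((st.1.getD (i+1) []).set (j+1) (pvCell st.1 i j + 1))
          (m', max st.2 (pvCell m' (i+1) (j+1)))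
        else st) st) := by
  have base : pvInv a b (pvReg i 0) st := by
    refine pvInv_ext a b _ _ st ?_ ?_ hI
    · intro r c _ _ h
      exact Or.inl h
    · intro r c _ _ hR' hR
      rcases hR' with h | ⟨_, h1c, h2c⟩
      · exact absurd h hR
      · omega
  have main : ∀ n, n ≤ b.length → pvInv a b (pvReg i n)
      ((List.range n).foldl (fun st j =>
        if a.getD i ' ' = b.getD j ' ' then
          let m' := st.1.set (i+1) ((st.1.getD (i+1) []).set (j+1) (pvCell st.1 i j + 1))
          (m', max st.2 (pvCell m' (i+1) (j+1)))
        else st) st) := by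
    intro n
    induction n with
    | zero => intro _; simpa using base
    | succ n ihn =>
      intro hn
      rw [List.range_succ, List.foldl_append]
      simpa using pvInv_step a b i n hi (by omega) _ (ihn (by omega))
  refine pvInv_ext a b _ _ _ ?_ ?_ (main b.length (le_refl _))
  · intro r c _ _ hR
    rcases hR with h | ⟨hre, _, _⟩
    · omega
    · omega
  · intro r c _ hc hR' hR
    have hre : r = i + 1 := by
      rcases Nat.lt_or_ge r (i+1) with h | h
      · exact absurd (Or.inl (by omega)) hR
      · omega
    subst hre
    have hc0 : c = 0 := by
      by_contra h
      exact hR (Or.inr ⟨rfl, by omega, hc⟩)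
    subst hc0
    exact pvCsl_zero_right a b (i+1)

theorem lcs_max_iff (s1 s2 : String) (t : Nat) :
    t ≤ longest_common_substring s1 s2 ↔
      t = 0 ∨ ∃ r c, r ≤ s1.toList.length ∧ c ≤ s2.toList.length ∧
        t ≤ pvCsl s1.toList s2.toList r c := by
  have main : ∀ n, n ≤ s1.toList.length → pvInv s1.toList s2.toList (fun r _ => r ≤ n)
      ((List.range n).foldl (fun st i =>
        (List.range s2.toList.length).foldl (fun st j =>
          if s1.toList.getD i ' ' = s2.toList.getD j ' ' then
            let m' := st.1.set (i+1) ((st.1.getD (i+1) []).set (j+1) (pvCell st.1 i j + 1))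
            (m', max st.2 (pvCell m' (i+1) (j+1)))
          else st) st)
        (List.replicate (s1.toList.length + 1) (List.replicate (s2.toList.length + 1) 0), 0)) := by
    intro n
    induction n with
    | zero => intro _; simpa using pvInv_init s1.toList s2.toList
    | succ n ihn =>
      intro hn
      rw [List.range_succ, List.foldl_append]
      simpa using pvInv_inner s1.toList s2.toList n (by omega) _ (ihn (by omega))
  have h := (main s1.toList.length (le_refl _)).2.2.2 t
  simp only [longest_common_substring]
  rw [h]
  constructor
  · rintro (rfl | ⟨r, c, hr, hc, _, ht⟩)
    · exact Or.inl rfl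
    · exact Or.inr ⟨r, c, hr, hc, ht⟩
  · rintro (rfl | ⟨r, c, hr, hc, ht⟩)
    · exact Or.inl rfl
    · exact Or.inr ⟨r, c, hr, hc, hr, ht⟩

theorem pvTakeSucc (l : List Char) (d k : Nat) (h : d + k < l.length) :
    (l.drop d).take (k+1) = (l.drop d).take k ++ [l.getD (d+k) ' '] := by
  rw [List.take_add_one, List.getElem?_drop, List.getElem?_eq_getElem h, List.getD_eq_getElem l ' ' h]
  rfl

theorem pvCsl_ge_iff (a b : List Char) (k : Nat) : ∀ (i j : Nat), i ≤ a.length → j ≤ b.length →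
    (k ≤ pvCsl a b i j ↔
      k ≤ i ∧ k ≤ j ∧ (a.drop (i - k)).take k = (b.drop (j - k)).take k) := by
  induction k with
  | zero => intro i j _ _; simp
  | succ k ih =>
    intro i j hi hj
    cases i with
    | zero =>
      constructor
      · intro h; rw [pvCsl_zero_left] at h; omega
      · rintro ⟨h, _, _⟩; omega
    | succ i =>
      cases j with
      | zero =>
        constructor
        · intro h; rw [pvCsl_zero_right] at h; omega
        · rintro ⟨_, h, _⟩; omega
      | succ j =>
        rw [pvCsl_succ]
        by_cases hch : a.getD i ' ' = b.getD j ' '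
        · rw [if_pos hch]
          have h1 : k + 1 ≤ pvCsl a b i j + 1 ↔ k ≤ pvCsl a b i j := by omega
          rw [h1, ih i j (by omega) (by omega)]
          constructor
          · rintro ⟨hki, hkj, heq⟩
            refine ⟨by omega, by omega, ?_⟩
            rw [(by omega : i + 1 - (k+1) = i - k), (by omega : j + 1 - (k+1) = j - k),
                pvTakeSucc a (i-k) k (by omega), pvTakeSucc b (j-k) k (by omega),
                Nat.sub_add_cancel hki, Nat.sub_add_cancel hkj, heq, hch]
          · rintro ⟨hki, hkj, heq⟩
            have hki' : k ≤ i := by omega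
            have hkj' : k ≤ j := by omega
            refine ⟨hki', hkj', ?_⟩
            rw [(by omega : i + 1 - (k+1) = i - k), (by omega : j + 1 - (k+1) = j - k),
                pvTakeSucc a (i-k) k (by omega), pvTakeSucc b (j-k) k (by omega),
                Nat.sub_add_cancel hki', Nat.sub_add_cancel hkj'] at heq
            exact (List.append_inj' heq (by simp)).1
        · rw [if_neg hch]
          constructor
          · intro h; omega
          · rintro ⟨hki, hkj, heq⟩
            have hki' : k ≤ i := by omega
            have hkj' : k ≤ j := by omega
            rw [(by omega : i + 1 - (k+1) = i - k), (by omega : j + 1 - (k+1) = j - k),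
                pvTakeSucc a (i-k) k (by omega), pvTakeSucc b (j-k) k (by omega),
                Nat.sub_add_cancel hki', Nat.sub_add_cancel hkj'] at heq
            have hlast := (List.append_inj' heq (by simp)).2
            simp only [List.cons.injEq, and_true] at hlast
            exact absurd hlast hch

theorem mem_pvGrams (l : List Char) (k : Nat) (g : List Char) :
    g ∈ pvGrams l k ↔ ∃ p, p + k ≤ l.length ∧ g = (l.drop p).take k := by
  unfold pvGrams
  rw [List.mem_map]
  constructor
  · rintro ⟨p, hp, rfl⟩
    exact ⟨p, by have := List.mem_range.mp hp; omega, rfl⟩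
  · rintro ⟨p, hp, rfl⟩
    exact ⟨p, List.mem_range.mpr (by omega), rfl⟩

-- the heart: LCS ≥ k iff the two strings share a k-gram (k ≥ 1)
theorem lcs_ge_iff_gram (s1 s2 : String) (k : Nat) (hk : 1 ≤ k) :
    k ≤ longest_common_substring s1 s2 ↔
      ∃ g, g ∈ pvGrams s1.toList k ∧ g ∈ pvGrams s2.toList k := by
  rw [lcs_max_iff]
  constructor
  · rintro (rfl | ⟨r, c, hr, hc, ht⟩)
    · omega
    · obtain ⟨hkr, hkc, heq⟩ := (pvCsl_ge_iff _ _ k r c hr hc).mp ht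
      refine ⟨(s1.toList.drop (r-k)).take k, ?_, ?_⟩
      · exact (mem_pvGrams _ _ _).mpr ⟨r - k, by omega, rfl⟩
      · rw [heq]
        exact (mem_pvGrams _ _ _).mpr ⟨c - k, by omega, rfl⟩
  · rintro ⟨g, hg1, hg2⟩
    obtain ⟨p, hp, rfl⟩ := (mem_pvGrams _ _ _).mp hg1
    obtain ⟨q, hq, hgq⟩ := (mem_pvGrams _ _ _).mp hg2
    right
    refine ⟨p + k, q + k, by omega, by omega, ?_⟩
    rw [pvCsl_ge_iff _ _ k (p+k) (q+k) (by omega) (by omega)]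
    refine ⟨by omega, by omega, ?_⟩
    simpa [Nat.add_sub_cancel] using hgq

-- ===== VERDICT (by name: the statement is the Claim_ definition above) =====
theorem find_tcr_chains_by_seq_spec : Claim_equal_find_tcr_chains_by_seq := by
  intro chain_seqs seg_seq min_len _
  unfold Spec_find_tcr_chains_by_seq
  simp only [find_tcr_chains_by_seq, find_tcr_chains_by_seq_alt]
  by_cases hml : min_len ≤ 0
  · rw [if_pos hml]
    refine (PySem.List.foldl_congr_mem chain_seqs _ (fun hits p => hits ++ [p.1]) [] ?_).trans ?_
    · intro acc x _
      exact if_pos (le_trans hml (Int.natCast_nonneg _))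
    · simpa using PySem.List.foldl_append_singleton_eq_map Prod.fst chain_seqs []
  · rw [if_neg hml]
    apply PySem.List.foldl_congr_mem
    intro acc p _
    have hk : 1 ≤ min_len.toNat := by omega
    have hiff : ((longest_common_substring (PySem.Str.lower p.2) (PySem.Str.lower seg_seq) : Int) ≥ min_len)
        ↔ ((pvGrams ((PySem.Str.lower p.2).toList) min_len.toNat).any
            (fun g => PySem.Set.contains
              (PySem.Set.ofList (pvGrams ((PySem.Str.lower seg_seq).toList) min_len.toNat)) g) = true) := by
      rw [ge_iff_le, ← Int.toNat_le, lcs_ge_iff_gram _ _ _ hk, List.any_eq_true]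
      constructor
      · rintro ⟨g, h1, h2⟩
        exact ⟨g, h1, (PySem.Set.contains_iff _ g).mpr ((PySem.Set.mem_ofList _ g).mpr h2)⟩
      · rintro ⟨g, h1, h2⟩
        exact ⟨g, h1, (PySem.Set.mem_ofList _ g).mp ((PySem.Set.contains_iff _ g).mp h2)⟩
    exact if_congr hiff rfl rfl
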